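-- pv_equiv track=rewrite | github.com/aisc-digital/PythonUnityMerger | UnityMerger/listmerger.py | highlight_string_at_idxs
-- ===== SOURCE A (Python) =====
-- def highlight_string_at_idxs(string, indexes):
--     # hl = "\x1b[38;5;160m"  # 8-bit
--     hl = "\x1b[91m"
--     reset = "\x1b[0m"
--     words_with_hl = []
--     for string_idx, word in enumerate(string.split(" ")):
--         if string_idx in indexes:
--             words_with_hl.append(hl + word + reset)
--         else:
--             words_with_hl.append(word)
--     return " ".join(words_with_hl)
-- ===== SOURCE B (Python) =====
-- def highlight_string_at_idxs(string, indexes):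
--     hl = "\x1b[91m"
--     reset = "\x1b[0m"
--     words = string.split(" ")
--     for idx in set(indexes):
--         if 0 <= idx < len(words):
--             words[idx] = hl + words[idx] + reset
--     return " ".join(words)
-- ===== Notes on version B (the rewrite author's own statement) =====
-- stated objective: alternative
-- what changed: B inverts the traversal: instead of scanning every word and testing its index against the indexes list (a linear scan per word), B dedupes the indexes into a set and wraps only the words at those in-range positions in place, then joins once.
import Mathlib
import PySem

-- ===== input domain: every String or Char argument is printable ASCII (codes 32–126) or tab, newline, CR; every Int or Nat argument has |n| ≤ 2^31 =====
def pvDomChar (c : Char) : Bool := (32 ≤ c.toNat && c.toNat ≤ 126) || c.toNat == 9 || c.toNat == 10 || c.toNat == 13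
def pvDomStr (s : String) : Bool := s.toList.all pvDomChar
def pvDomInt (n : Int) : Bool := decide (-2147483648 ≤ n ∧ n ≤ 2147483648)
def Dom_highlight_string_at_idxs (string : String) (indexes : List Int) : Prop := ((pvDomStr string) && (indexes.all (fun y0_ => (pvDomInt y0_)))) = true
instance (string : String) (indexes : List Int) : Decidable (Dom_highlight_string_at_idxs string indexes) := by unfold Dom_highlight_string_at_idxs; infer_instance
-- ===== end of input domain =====

-- B dedupes the indexes into a set and wraps only the words at those in-range positions,
-- instead of scanning every word and testing its index against the whole indexes list.

-- ===== PORT A =====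
def highlight_string_at_idxs (string : String) (indexes : List Int) : String :=
  let hl := "\x1b[91m"
  let reset := "\x1b[0m"
  let words_with_hl : List String :=
    (PySem.List.enumerate ((PySem.Str.split? string " ").getD []) 0).foldl
      (fun acc p => if p.1 ∈ indexes then acc ++ [hl ++ p.2 ++ reset] else acc ++ [p.2]) []
  PySem.Str.join " " words_with_hl

-- ===== PORT B =====
def highlight_string_at_idxs_alt (string : String) (indexes : List Int) : String :=
  let hl := "\x1b[91m"
  let reset := "\x1b[0m"
  let words := (PySem.Str.split? string " ").getD []
  let words :=
    (PySem.Set.ofList indexes).foldl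
      (fun ws idx =>
        if 0 ≤ idx ∧ idx < (ws.length : Int) then
          PySem.List.pySetD ws idx (hl ++ PySem.List.pyGetD ws idx "" ++ reset)
        else ws) words
  PySem.Str.join " " words

-- ===== PRECONDITION & SPEC =====
def Spec_highlight_string_at_idxs (string : String) (indexes : List Int) (out : String) : Prop := out = highlight_string_at_idxs_alt string indexes
instance (string : String) (indexes : List Int) (out : String) : Decidable (Spec_highlight_string_at_idxs string indexes out) := by unfold Spec_highlight_string_at_idxs; infer_instance

-- ===== CLAIM (what is proved, stated in full; the proofs are below) =====
def Claim_equal_highlight_string_at_idxs : Prop := ∀ (string : String) (indexes : List Int), Dom_highlight_string_at_idxs string indexes → Spec_highlight_string_at_idxs string indexes (highlight_string_at_idxs string indexes)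

-- ===== LEMMAS AND PROOFS =====

-- wrap, shared vocabulary for the proof
def pvWrap (w : String) : String := "\x1b[91m" ++ w ++ "\x1b[0m"

-- the word list with every position in s wrapped (membership formulation)
def pvMark (s : List Int) (ws : List String) : List String :=
  (PySem.List.enumerate ws 0).map (fun p => if p.1 ∈ s then pvWrap p.2 else p.2)

-- B's one update step
def pvStep (ws : List String) (idx : Int) : List String :=
  if 0 ≤ idx ∧ idx < (ws.length : Int) then
    PySem.List.pySetD ws idx (pvWrap (PySem.List.pyGetD ws idx "")) else ws

theorem pvStep_getElem? (ws : List String) (idx : Int) (i : Nat) :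
    (pvStep ws idx)[i]? = (ws[i]?).map (fun w =>
      if (i : Int) = idx ∧ 0 ≤ idx ∧ idx < (ws.length : Int) then pvWrap w else w) := by
  unfold pvStep
  by_cases h : 0 ≤ idx ∧ idx < (ws.length : Int)
  · rw [if_pos h, PySem.List.pySetD_of_nonneg _ _ h.1,
        PySem.List.pyGetD_eq_getElem _ _ h.1 h.2]
    rw [List.getElem?_set]
    by_cases hlt : i < ws.length
    · rw [List.getElem?_eq_getElem hlt]
      by_cases hix : (i : Int) = idx
      · have ht : idx.toNat = i := by omega
        simp [ht, hix, h, hlt]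
      · have ht : ¬ idx.toNat = i := by omega
        simp [ht, hix]
    · have ht : ¬ idx.toNat = i := by omega
      have hn : ws[i]? = none := List.getElem?_eq_none_iff.mpr (by omega)
      simp [ht, hn]
  · rw [if_neg h]
    cases hw : ws[i]? with
    | none => simp
    | some w => simp [h]

theorem pvMark_getElem? (s : List Int) (ws : List String) (i : Nat) :
    (pvMark s ws)[i]? = (ws[i]?).map (fun w => if (i : Int) ∈ s then pvWrap w else w) := by
  unfold pvMark
  rw [List.getElem?_map, PySem.List.getElem?_enumerate]
  cases ws[i]? <;> simp

theorem pvMark_step (s : List Int) (x : Int) (hx : x ∉ s) (ws : List String) :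
    pvMark s (pvStep ws x) = pvMark (x :: s) ws := by
  apply List.ext_getElem?
  intro i
  rw [pvMark_getElem?, pvMark_getElem?, pvStep_getElem?, Option.map_map]
  cases hw : ws[i]? with
  | none => simp
  | some w =>
    have hlt : i < ws.length := by
      by_contra hc
      rw [List.getElem?_eq_none_iff.mpr (by omega)] at hw
      simp at hw
    simp only [Option.map_some, Option.some.injEq, Function.comp]
    by_cases hmem : (i : Int) ∈ s
    · have hne : ¬((i : Int) = x) := fun he => hx (he ▸ hmem)
      simp [hmem, hne]
    · by_cases hie : (i : Int) = x
      · have hr : 0 ≤ x ∧ x < (ws.length : Int) := by constructor <;> omega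
        simp [hie, hr, hx]
      · simp [hmem, hie]

theorem pvFold_eq_mark (s : List Int) (ws : List String) (hnd : s.Nodup) :
    s.foldl pvStep ws = pvMark s ws := by
  induction s generalizing ws with
  | nil =>
      have h := PySem.List.map_snd_enumerate ws (0 : Int)
      simp only [pvMark, List.not_mem_nil, if_false]
      simp [h]
  | cons x t ih =>
      simp only [List.foldl_cons]
      rw [ih _ (List.nodup_cons.mp hnd).2, pvMark_step t x (List.nodup_cons.mp hnd).1 ws]

theorem pvA_foldl_eq_mark (indexes : List Int) (ws : List String) :
    (PySem.List.enumerate ws 0).foldl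
      (fun acc p => if p.1 ∈ indexes then acc ++ [pvWrap p.2] else acc ++ [p.2]) [] =
    pvMark indexes ws := by
  unfold pvMark
  generalize PySem.List.enumerate ws 0 = l
  induction l using List.reverseRecOn with
  | nil => simp
  | append_singleton l p ih =>
      simp only [List.foldl_append, List.foldl_cons, List.foldl_nil, List.map_append, ih]
      split <;> rename_i h <;> simp [h]

-- ===== VERDICT (by name: the statement is the Claim_ definition above) =====
theorem highlight_string_at_idxs_spec : Claim_equal_highlight_string_at_idxs := by
  intro string indexes _
  unfold Spec_highlight_string_at_idxs highlight_string_at_idxs highlight_string_at_idxs_alt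
  simp only []
  congr 1
  rw [show (fun acc (p : Int × String) =>
        if p.1 ∈ indexes then acc ++ ["\x1b[91m" ++ p.2 ++ "\x1b[0m"] else acc ++ [p.2]) =
      (fun acc p => if p.1 ∈ indexes then acc ++ [pvWrap p.2] else acc ++ [p.2]) from rfl,
      show (fun (ws : List String) (idx : Int) =>
        if 0 ≤ idx ∧ idx < (ws.length : Int) then
          PySem.List.pySetD ws idx ("\x1b[91m" ++ PySem.List.pyGetD ws idx "" ++ "\x1b[0m")
        else ws) = pvStep from rfl]
  rw [pvA_foldl_eq_mark, pvFold_eq_mark _ _ (PySem.Set.nodup_ofList indexes)]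
  unfold pvMark
  apply List.map_congr_left
  intro p _
  by_cases h : p.1 ∈ indexes <;> simp [h, PySem.Set.mem_ofList]
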